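-- pv_equiv track=rewrite | github.com/kick250/processamento-python-tp1-2023 | exercise_9.py | is_creatable_triangle
-- ===== SOURCE A (Python) =====
-- def is_valid_triangle(value1, value2, value3):
--   if not ((value1 + value2) > value3):
--     return False
--   if not ((value1 + value3) > value2):
--     return False
--   if not ((value2 + value3) > value1):
--     return False
--   return True
--
-- def is_creatable_triangle(value1, value2, value3, value4):
--   possibilities = (
--     (value1, value2, value3),
--     (value2, value3, value4),
--     (value1, value3, value4),
--     (value1, value2, value4),
--   )
--
--   for possibility in possibilities:
--     if is_valid_triangle(possibility[0], possibility[1], possibility[2]):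
--       return True
--   return False
-- ===== SOURCE B (Python) =====
-- def is_creatable_triangle(value1, value2, value3, value4):
--     # Sort once; among sorted values a valid triple exists iff one of the
--     # two consecutive triples is valid (a <= b <= c <= d: if any x+y > z
--     # works, then the consecutive triple ending at the same largest element
--     # works too, since its two smaller members are at least as large).
--     s = sorted((value1, value2, value3, value4))
--     return s[0] + s[1] > s[2] or s[1] + s[2] > s[3]
-- ===== Notes on version B (the rewrite author's own statement) =====
-- stated objective: simpler
-- what changed: B sorts the four values once and tests only the two consecutive sorted triples with a single inequality each (s[0]+s[1]>s[2] or s[1]+s[2]>s[3]), instead of A's enumeration of all four triples with three inequalities each; correctness rests on the lemma that if any triple satisfies the triangle inequality then a consecutive sorted triple does.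
import Mathlib
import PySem

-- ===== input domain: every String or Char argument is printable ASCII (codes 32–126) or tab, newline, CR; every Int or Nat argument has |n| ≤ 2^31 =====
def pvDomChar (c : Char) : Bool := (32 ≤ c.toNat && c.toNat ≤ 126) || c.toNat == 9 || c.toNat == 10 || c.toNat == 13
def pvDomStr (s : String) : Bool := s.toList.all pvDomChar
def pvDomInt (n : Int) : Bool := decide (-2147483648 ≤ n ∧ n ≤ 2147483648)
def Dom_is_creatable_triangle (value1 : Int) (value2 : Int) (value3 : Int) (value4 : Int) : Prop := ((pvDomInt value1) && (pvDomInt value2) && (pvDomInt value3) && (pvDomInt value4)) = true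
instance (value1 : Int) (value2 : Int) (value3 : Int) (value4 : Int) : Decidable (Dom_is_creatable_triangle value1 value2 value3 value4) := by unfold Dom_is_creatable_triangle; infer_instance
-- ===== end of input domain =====

-- B sorts the four values once and checks only the two consecutive sorted triples, one inequality each (objective: simpler).

-- ===== PORT A =====
def is_valid_triangle (value1 : Int) (value2 : Int) (value3 : Int) : Bool :=
  if ¬ (value1 + value2 > value3) then false
  else if ¬ (value1 + value3 > value2) then false
  else if ¬ (value2 + value3 > value1) then false
  else true

def is_creatable_triangle (value1 : Int) (value2 : Int) (value3 : Int) (value4 : Int) : Bool :=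
  let possibilities : List (Int × Int × Int) :=
    [(value1, value2, value3), (value2, value3, value4),
     (value1, value3, value4), (value1, value2, value4)]
  -- for-loop with early 'return True', else False
  possibilities.any (fun p => is_valid_triangle p.1 p.2.1 p.2.2)

-- ===== PORT B =====
def is_creatable_triangle_alt (value1 : Int) (value2 : Int) (value3 : Int) (value4 : Int) : Bool :=
  -- s = sorted((value1, value2, value3, value4)); sorted of a 4-tuple always has 4 elements
  match PySem.List.sorted [value1, value2, value3, value4] (fun x => x) false with
  | [a, b, c, d] => decide (a + b > c) || decide (b + c > d)
  | _ => false

-- ===== PRECONDITION & SPEC =====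
def Spec_is_creatable_triangle (value1 : Int) (value2 : Int) (value3 : Int) (value4 : Int) (out : Bool) : Prop := out = is_creatable_triangle_alt value1 value2 value3 value4
instance (value1 : Int) (value2 : Int) (value3 : Int) (value4 : Int) (out : Bool) : Decidable (Spec_is_creatable_triangle value1 value2 value3 value4 out) := by unfold Spec_is_creatable_triangle; infer_instance

-- ===== CLAIM (what is proved, stated in full; the proofs are below) =====
def Claim_equal_is_creatable_triangle : Prop := ∀ (value1 : Int) (value2 : Int) (value3 : Int) (value4 : Int), Dom_is_creatable_triangle value1 value2 value3 value4 → Spec_is_creatable_triangle value1 value2 value3 value4 (is_creatable_triangle value1 value2 value3 value4)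

-- ===== LEMMAS AND PROOFS =====

-- A's three-inequality helper as one decidable proposition.
theorem valid_eq (a b c : Int) :
    is_valid_triangle a b c = decide (a + b > c ∧ a + c > b ∧ b + c > a) := by
  unfold is_valid_triangle
  split_ifs <;> simp <;> omega

-- ===== VERDICT (by name: the statement is the Claim_ definition above) =====
theorem is_creatable_triangle_spec : Claim_equal_is_creatable_triangle := by
  intro v1 v2 v3 v4 _
  unfold Spec_is_creatable_triangle is_creatable_triangle is_creatable_triangle_alt
  by_cases h21 : v2 < v1 <;> by_cases h31 : v3 < v1 <;> by_cases h32 : v3 < v2 <;>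
    by_cases h41 : v4 < v1 <;> by_cases h42 : v4 < v2 <;> by_cases h43 : v4 < v3 <;>
    simp [PySem.List.sorted, PySem.List.insertBy, valid_eq,
          h21, h31, h32, h41, h42, h43] <;>
    (try (rw [Bool.eq_iff_iff]
          simp only [Bool.or_eq_true, Bool.and_eq_true, decide_eq_true_eq])) <;> omega
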